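-- pv_equiv track=rewrite | github.com/xongeeuse/Algorithm_study | Week08/손채이/외톨이_알파벳.py | solution
-- ===== SOURCE A (Python) =====
-- def solution(input_string):
--     lonely_alphabets = set()
--     current_char = ''
--     string = set()
--
--     for char in input_string:
--         if char != current_char:
--             if char in string:
--                 lonely_alphabets.add(char)
--             string.add(char)
--             current_char = char
--
--     if lonely_alphabets:
--         return ''.join(sorted(lonely_alphabets))
--     else:
--         return "N"
-- ===== SOURCE B (Python) =====
-- def solution(input_string):
--     # A character is "lonely" iff its occurrences do not form one contiguous
--     # block, i.e. the index span from its first to its last occurrence is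
--     # longer than its multiplicity.  No run-compression / seen-set needed.
--     lonely = []
--     for c in sorted(set(input_string)):
--         pos = [i for i, ch in enumerate(input_string) if ch == c]
--         if pos[-1] - pos[0] + 1 != len(pos):
--             lonely.append(c)
--     return ''.join(lonely) if lonely else 'N'
-- ===== Notes on version B (the rewrite author's own statement) =====
-- stated objective: alternative
-- what changed: Replaced A's left-to-right run detection (previous-char comparison plus a growing seen-set) by a per-character positional test: for each distinct character, collect its occurrence indices and flag it iff the span last-first+1 differs from its count, i.e. its occurrences are not one contiguous block.
import Mathlib
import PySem

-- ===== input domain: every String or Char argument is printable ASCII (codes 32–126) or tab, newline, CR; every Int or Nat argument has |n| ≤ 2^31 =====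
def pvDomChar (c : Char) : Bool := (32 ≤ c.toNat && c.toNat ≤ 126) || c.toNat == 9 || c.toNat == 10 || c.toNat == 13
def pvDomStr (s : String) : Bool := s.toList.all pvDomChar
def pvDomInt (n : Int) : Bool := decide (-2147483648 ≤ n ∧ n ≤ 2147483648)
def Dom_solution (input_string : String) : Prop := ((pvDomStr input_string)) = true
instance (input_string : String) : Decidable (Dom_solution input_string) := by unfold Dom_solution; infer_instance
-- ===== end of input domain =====

-- B replaces A's left-to-right run detection (previous-char comparison plus a seen-set) by a per-character
-- positional test: a character is lonely iff the span from its first to its last occurrence index exceeds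
-- its multiplicity (its occurrences are not one contiguous block). Alternative algorithm, similar cost.

-- ===== PORT A =====
-- state = (lonely_alphabets, current_char, string); the initial current_char '' is modelled as 'none'
def solution (input_string : String) : String :=
  let st := input_string.toList.foldl
    (fun (st : PySem.Set Char × Option Char × PySem.Set Char) char =>
      if some char ≠ st.2.1 then
        ((if st.2.2.contains char then st.1.add char else st.1), some char, st.2.2.add char)
      else st)
    (PySem.Set.empty, none, PySem.Set.empty)
  if st.1 ≠ [] then String.ofList (PySem.List.sorted st.1 (fun c => c) false) else "N"

-- ===== PORT B =====
-- pos[-1] / pos[0] are ported with pyGetD (pos is never empty: c ranges over set(input_string))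
def solution_alt (input_string : String) : String :=
  let cs := input_string.toList
  let lonely := (PySem.List.sorted (PySem.Set.ofList cs) (fun c => c) false).foldl
    (fun (acc : List Char) c =>
      let pos := (PySem.List.enumerate cs 0).filterMap (fun p => if p.2 = c then some p.1 else none)
      if PySem.List.pyGetD pos (-1) 0 - PySem.List.pyGetD pos 0 0 + 1 ≠ (pos.length : Int) then
        acc ++ [c]
      else acc)
    []
  if lonely ≠ [] then String.ofList lonely else "N"

-- ===== PRECONDITION & SPEC =====
def Spec_solution (input_string : String) (out : String) : Prop := out = solution_alt input_string
instance (input_string : String) (out : String) : Decidable (Spec_solution input_string out) := by unfold Spec_solution; infer_instance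

-- ===== CLAIM (what is proved, stated in full; the proofs are below) =====
def Claim_equal_solution : Prop := ∀ (input_string : String), Dom_solution input_string → Spec_solution input_string (solution input_string)

-- ===== LEMMAS AND PROOFS =====

-- run leaders, with the previous character as an Option (mirrors A's fold state)
def lead : Option Char → List Char → List Char
  | _, [] => []
  | p, x :: t => if some x ≠ p then x :: lead (some x) t else lead p t

def stepA (st : PySem.Set Char × Option Char × PySem.Set Char) (char : Char) :
    PySem.Set Char × Option Char × PySem.Set Char :=
  if some char ≠ st.2.1 then
    ((if st.2.2.contains char then st.1.add char else st.1), some char, st.2.2.add char)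
  else st

def step2 (st : PySem.Set Char × PySem.Set Char) (c : Char) : PySem.Set Char × PySem.Set Char :=
  ((if st.2.contains c then st.1.add c else st.1), st.2.add c)

lemma foldA_eq (cs : List Char) : ∀ (l s : PySem.Set Char) (cur : Option Char),
    ((cs.foldl stepA (l, cur, s)).1, (cs.foldl stepA (l, cur, s)).2.2)
      = (lead cur cs).foldl step2 (l, s) := by
  induction cs with
  | nil => intro l s cur; cases cur <;> rfl
  | cons c rest ih =>
    intro l s cur
    by_cases h : some c = cur
    · simp only [List.foldl_cons, stepA, lead, h, ne_eq, not_true_eq_false, reduceIte]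
      exact ih l s cur
    · simp only [List.foldl_cons, stepA, lead, ne_eq, h, not_false_eq_true, reduceIte, if_pos h]
      simpa [step2] using ih _ _ (some c)


lemma mem_fold2 (L : List Char) : ∀ (l s : PySem.Set Char) (x : Char),
    x ∈ (L.foldl step2 (l, s)).1 ↔ x ∈ l ∨ (x ∈ L ∧ x ∈ s) ∨ 2 ≤ L.count x := by
  induction L with
  | nil => intro l s x; simp
  | cons c rest ih =>
    intro l s x
    simp only [List.foldl_cons, step2, ih]
    have hladd : x ∈ (if PySem.Set.contains s c = true then PySem.Set.add l c else l) ↔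
        x ∈ l ∨ (x = c ∧ c ∈ s) := by
      by_cases hc : c ∈ s
      · rw [if_pos ((PySem.Set.contains_iff s c).mpr hc)]
        simp [PySem.Set.mem_add, hc]
      · rw [if_neg (fun h => hc ((PySem.Set.contains_iff s c).mp h))]
        tauto
    rw [hladd]
    by_cases hxc : x = c
    · subst hxc
      have hadd : x ∈ PySem.Set.add s x := (PySem.Set.mem_add s x x).mpr (Or.inr rfl)
      have hmr : x ∈ rest ↔ 0 < rest.count x := List.count_pos_iff.symm
      have hcc : (x :: rest).count x = rest.count x + 1 := by simp [List.count_cons]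
      rw [hcc]
      by_cases hl : x ∈ l <;> by_cases hs : x ∈ s <;> by_cases hr : x ∈ rest <;>
        simp_all <;> first | omega | (rw [List.count_eq_zero.mpr hr]; omega)
    · have hmemadd : x ∈ PySem.Set.add s c ↔ x ∈ s := by
        simp [PySem.Set.mem_add, hxc]
      rw [hmemadd]
      simp [List.count_cons, hxc, Ne.symm hxc]


lemma nodup_fold2 (L : List Char) : ∀ (l s : PySem.Set Char), l.Nodup →
    ((L.foldl step2 (l, s)).1).Nodup := by
  induction L with
  | nil => intro l s h; exact h
  | cons c rest ih =>
    intro l s h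
    simp only [List.foldl_cons, step2]
    apply ih
    by_cases hc : PySem.Set.contains s c = true
    · rw [if_pos hc]; exact PySem.Set.nodup_add l c h
    · rwa [if_neg hc]



lemma count_lead_eq_zero {c : Char} (t : List Char) (p : Option Char) (h : c ∉ t) :
    (lead p t).count c = 0 := by
  induction t generalizing p with
  | nil => simp [lead]
  | cons y r ih =>
    simp only [List.mem_cons, not_or] at h
    simp only [lead]
    split
    · simp [List.count_cons, ih _ h.2, Ne.symm h.1, h.1]
    · exact ih _ h.2


-- dropping a c-free prefix keeps the c-count of lead, up to the previous-char state
lemma count_lead_prefix {c : Char} (xs : List Char) : ∀ (ys : List Char) (p : Option Char),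
    p ≠ some c → c ∉ xs →
    ∃ q, q ≠ some c ∧ (lead p (xs ++ ys)).count c = (lead q ys).count c := by
  induction xs with
  | nil => intro ys p hp _; exact ⟨p, hp, rfl⟩
  | cons x t ih =>
    intro ys p hp hx
    simp only [List.mem_cons, not_or] at hx
    simp only [List.cons_append, lead]
    split
    · have := ih ys (some x) (by simpa using Ne.symm hx.1) hx.2
      rcases this with ⟨q, hq, he⟩
      exact ⟨q, hq, by simp [List.count_cons, Ne.symm hx.1, hx.1, he]⟩
    · exact ih ys p hp hx.2


-- a c-free suffix contributes no c to lead
lemma count_lead_suffix {c : Char} (xs : List Char) : ∀ (ys : List Char) (p : Option Char), c ∉ ys →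
    (lead p (xs ++ ys)).count c = (lead p xs).count c := by
  induction xs with
  | nil => intro ys p hy; simpa [lead] using count_lead_eq_zero ys p hy
  | cons x t ih =>
    intro ys p hy
    simp only [List.cons_append, lead]
    split
    · simp [List.count_cons, ih ys (some x) hy]
    · exact ih ys p hy


lemma mem_lead_of_mem {c : Char} : ∀ (t : List Char) (p : Option Char), p ≠ some c → c ∈ t →
    c ∈ lead p t := by
  intro t
  induction t with
  | nil => intro p _ h; simp at h
  | cons y r ih =>
    intro p hp h
    by_cases hyc : y = c
    · subst hyc
      have hne : some y ≠ p := fun e => hp e.symm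
      simp [lead, hne]
    · have hcr : c ∈ r := by
        rcases List.mem_cons.mp h with h | h
        · exact absurd h.symm hyc
        · exact h
      simp only [lead]
      split
      · exact List.mem_cons_of_mem _ (ih (some y) (by simpa using hyc) hcr)
      · exact ih p hp hcr


-- middle block ending in c: a second run starts iff some non-c occurs in it
lemma count_lead_mid {c : Char} : ∀ (m : List Char), (m = [] ∨ m.getLast? = some c) →
    (1 ≤ (lead (some c) m).count c ↔ ∃ x ∈ m, x ≠ c) := by
  intro m
  induction m with
  | nil => simp [lead]
  | cons x t ih =>
    intro hl
    have hlast : t = [] ∨ t.getLast? = some c := by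
      rcases hl with hl | hl
      · simp at hl
      · rcases t with _ | ⟨a, r⟩
        · exact Or.inl rfl
        · right; rwa [List.getLast?_cons_cons] at hl
    by_cases hx : x = c
    · subst hx
      simp only [lead, ne_eq, not_true_eq_false, reduceIte, Option.some.injEq]
      rw [ih hlast]
      constructor
      · rintro ⟨y, hy, hne⟩; exact ⟨y, List.mem_cons_of_mem _ hy, hne⟩
      · rintro ⟨y, hy, hne⟩
        rcases List.mem_cons.mp hy with h | h
        · exact absurd h hne
        · exact ⟨y, h, hne⟩
    · have hct : c ∈ t := by
        rcases hlast with h | h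
        · subst h
          rcases hl with hl | hl
          · simp at hl
          · simp at hl; exact absurd hl hx
        · exact List.mem_of_getLast? h
      have hmem : c ∈ lead (some x) t :=
        mem_lead_of_mem t (some x) (by simpa using hx) hct
      have hpos : 1 ≤ (lead (some x) t).count c := List.count_pos_iff.mpr hmem
      simp only [lead, ne_eq, Option.some.injEq, hx, not_false_eq_true, reduceIte]
      constructor
      · intro _; exact ⟨x, List.mem_cons_self, hx⟩
      · intro _
        simpa [List.count_cons, hx] using hmem


-- positions of c, starting at index s (pA c s cs = the filterMap over enumerate cs s)
def pA (c : Char) (s : Int) : List Char → List Int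
  | [] => []
  | x :: t => if x = c then s :: pA c (s + 1) t else pA c (s + 1) t

lemma pA_eq_filterMap (c : Char) : ∀ (cs : List Char) (s : Int),
    (PySem.List.enumerate cs s).filterMap (fun p => if p.2 = c then some p.1 else none) = pA c s cs := by
  intro cs
  induction cs with
  | nil => intro s; rfl
  | cons x t ih =>
    intro s
    rw [PySem.List.enumerate_cons]
    by_cases hx : x = c
    · simp [pA, hx, ih]
    · simp [pA, hx, ih]


lemma length_pA (c : Char) : ∀ (cs : List Char) (s : Int), (pA c s cs).length = cs.count c := by
  intro cs
  induction cs with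
  | nil => intro s; rfl
  | cons x t ih =>
    intro s
    by_cases hx : x = c
    · simp [pA, hx, ih, List.count_cons]
    · simp [pA, hx, ih, List.count_cons, Ne.symm hx]


lemma pA_append (c : Char) : ∀ (xs ys : List Char) (s : Int),
    pA c s (xs ++ ys) = pA c s xs ++ pA c (s + xs.length) ys := by
  intro xs
  induction xs with
  | nil => intro ys s; simp [pA]
  | cons x t ih =>
    intro ys s
    by_cases hx : x = c
    · simp [pA, hx, ih, add_assoc]
      ring_nf
    · simp [pA, hx, ih]
      ring_nf


lemma pA_nil_of_not_mem (c : Char) : ∀ (xs : List Char) (s : Int), c ∉ xs → pA c s xs = [] := by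
  intro xs
  induction xs with
  | nil => intro s _; rfl
  | cons x t ih =>
    intro s h
    simp only [List.mem_cons, not_or] at h
    simp [pA, Ne.symm h.1, ih _ h.2]



lemma getLast?_pA (c : Char) : ∀ (xs : List Char) (s : Int), xs.getLast? = some c →
    (pA c s xs).getLast? = some (s + xs.length - 1) := by
  intro xs
  induction xs with
  | nil => intro s h; simp at h
  | cons x t ih =>
    intro s h
    rcases t with _ | ⟨a, r⟩
    · simp at h
      subst h
      simp [pA]
    · rw [List.getLast?_cons_cons] at h
      have hne : pA c (s + 1) (a :: r) ≠ [] := by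
        have hmem : c ∈ a :: r := List.mem_of_getLast? h
        have hlen := length_pA c (a :: r) (s + 1)
        intro he
        simp [he] at hlen
        have := List.count_pos_iff.mpr hmem
        omega
      have hih := ih (s + 1) h
      have hstep : pA c s (x :: a :: r) = if x = c then s :: pA c (s + 1) (a :: r) else pA c (s + 1) (a :: r) := rfl
      by_cases hx : x = c
      · rw [hstep, if_pos hx]
        rcases List.exists_cons_of_ne_nil hne with ⟨y, ys, hy⟩
        rw [hy, List.getLast?_cons_cons, ← hy, hih]
        congr 1
        simp [List.length_cons]
        ring
      · rw [hstep, if_neg hx, hih]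
        congr 1
        simp [List.length_cons]
        ring


-- first/last occurrence decomposition of a list containing c
lemma exists_decomp {c : Char} {cs : List Char} (h : c ∈ cs) :
    ∃ pre m suf, cs = pre ++ (c :: m) ++ suf ∧ c ∉ pre ∧ c ∉ suf ∧
      (m = [] ∨ m.getLast? = some c) := by
  rcases Option.isSome_iff_exists.mp ((PySem.List.index?_isSome_iff cs c).mpr h) with ⟨k, hk⟩
  rcases (PySem.List.index?_eq_some_iff cs c k).mp hk with ⟨pre, rest, hcs, -, hpre⟩
  have hrev : c ∈ (c :: rest).reverse := by simp
  rcases Option.isSome_iff_exists.mp ((PySem.List.index?_isSome_iff _ c).mpr hrev) with ⟨k2, hk2⟩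
  rcases (PySem.List.index?_eq_some_iff _ c k2).mp hk2 with ⟨p2, s2, hrev2, -, hp2⟩
  have hL : c :: rest = s2.reverse ++ [c] ++ p2.reverse := by
    have := congrArg List.reverse hrev2
    simpa [List.reverse_append] using this
  rcases hs2 : s2.reverse with _ | ⟨z, zs⟩
  · rw [hs2] at hL
    simp only [List.nil_append, List.cons_append, List.cons.injEq, true_and] at hL
    refine ⟨pre, [], p2.reverse, ?_, hpre, by simpa using hp2, Or.inl rfl⟩
    rw [hcs, hL]
    simp
  · rw [hs2] at hL
    simp only [List.cons_append, List.cons.injEq] at hL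
    refine ⟨pre, zs ++ [c], p2.reverse, ?_, hpre, by simpa using hp2,
      Or.inr List.getLast?_concat⟩
    rw [hcs, hL.2]
    simp


-- the core equivalence: A's "starts ≥ 2 runs" test agrees with B's span test
lemma core (c : Char) (cs : List Char) :
    (2 ≤ (lead none cs).count c) ↔
      (c ∈ cs ∧
        (PySem.List.pyGetD (pA c 0 cs) (-1) 0 - PySem.List.pyGetD (pA c 0 cs) 0 0 + 1
          ≠ ((pA c 0 cs).length : Int))) := by
  by_cases hc : c ∈ cs
  · obtain ⟨pre, m, suf, hcs, hpre, hsuf, hm⟩ := exists_decomp hc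
    subst hcs
    -- A side
    have hsufeq := count_lead_suffix (pre ++ (c :: m)) suf none hsuf
    obtain ⟨q, hq, hcount⟩ := count_lead_prefix pre (c :: m) none (by simp) hpre
    have hlq : lead q (c :: m) = c :: lead (some c) m := by
      have : some c ≠ q := fun e => hq e.symm
      simp [lead, this]
    have hA : (lead none (pre ++ (c :: m) ++ suf)).count c = 1 + (lead (some c) m).count c := by
      rw [hsufeq, hcount, hlq, List.count_cons]
      simp [Nat.add_comm]
    -- B side
    have hgl : (c :: m).getLast? = some c := by
      rcases hm with hm | hm
      · subst hm; rfl
      · rcases m with _ | ⟨a, r⟩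
        · rfl
        · rw [List.getLast?_cons_cons]; exact hm
    have hpos : pA c 0 (pre ++ (c :: m) ++ suf) = pA c (pre.length : Int) (c :: m) := by
      rw [pA_append, pA_append, pA_nil_of_not_mem c pre 0 hpre,
        pA_nil_of_not_mem c suf _ hsuf]
      simp
    have hposc : pA c (pre.length : Int) (c :: m) =
        (pre.length : Int) :: pA c ((pre.length : Int) + 1) m := by
      simp [pA]
    have hlast : (pA c (pre.length : Int) (c :: m)).getLast? =
        some ((pre.length : Int) + ((c :: m).length : Int) - 1) :=
      getLast?_pA c (c :: m) _ hgl
    have hfirst : PySem.List.pyGetD (pA c (pre.length : Int) (c :: m)) 0 0 = (pre.length : Int) := by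
      rw [hposc]; simp [PySem.List.pyGetD, PySem.List.pyGet?, PySem.List.pyIdx?]
    have hlastD : PySem.List.pyGetD (pA c (pre.length : Int) (c :: m)) (-1) 0 =
        (pre.length : Int) + ((c :: m).length : Int) - 1 := by
      simp [PySem.List.pyGetD, PySem.List.pyGet?_neg_one, hlast]
    have hlen : ((pA c (pre.length : Int) (c :: m)).length : Int) = 1 + (m.count c : Int) := by
      rw [length_pA]
      simp [List.count_cons]
      omega
    rw [hA, hpos, hfirst, hlastD, hlen]
    have hmid := count_lead_mid m hm
    have hcnt : (m.count c ≠ m.length) ↔ ∃ x ∈ m, x ≠ c := by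
      constructor
      · intro hne
        by_contra hall
        push Not at hall
        exact hne (List.count_eq_length.mpr (fun b hb => by
          by_contra hbc
          exact hbc ((hall b hb).symm)))
      · rintro ⟨x, hx, hxne⟩ he
        have := List.count_eq_length.mp he x hx
        exact hxne this.symm
    have hlen2 : ((c :: m).length : Int) = (m.length : Int) + 1 := by simp
    constructor
    · intro h2
      refine ⟨hc, ?_⟩
      have h1 : 1 ≤ (lead (some c) m).count c := by omega
      have hex := hmid.mp h1
      have := hcnt.mpr hex
      rw [hlen2]
      intro he
      apply this
      have hmc : (m.count c : Int) = (m.length : Int) := by omega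
      exact_mod_cast hmc
    · rintro ⟨-, hne⟩
      rw [hlen2] at hne
      have hex : ∃ x ∈ m, x ≠ c := by
        apply hcnt.mp
        intro he
        apply hne
        rw [he]
        ring
      have := hmid.mpr hex
      omega
  · constructor
    · intro h2
      rw [count_lead_eq_zero cs none hc] at h2
      omega
    · rintro ⟨h, -⟩
      exact absurd h hc


-- ===== VERDICT (by name: the statement is the Claim_ definition above) =====
theorem solution_spec : Claim_equal_solution := by
  intro s _
  unfold Spec_solution
  show (if (s.toList.foldl stepA (PySem.Set.empty, none, PySem.Set.empty)).1 ≠ [] then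
          String.ofList (PySem.List.sorted (s.toList.foldl stepA (PySem.Set.empty, none, PySem.Set.empty)).1 (fun c => c) false)
        else "N")
    = (if ((PySem.List.sorted (PySem.Set.ofList s.toList) (fun c => c) false).foldl
          (fun (acc : List Char) c =>
            if PySem.List.pyGetD ((PySem.List.enumerate s.toList 0).filterMap (fun p => if p.2 = c then some p.1 else none)) (-1) 0
                - PySem.List.pyGetD ((PySem.List.enumerate s.toList 0).filterMap (fun p => if p.2 = c then some p.1 else none)) 0 0 + 1
                ≠ (((PySem.List.enumerate s.toList 0).filterMap (fun p => if p.2 = c then some p.1 else none)).length : Int) then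
              acc ++ [c]
            else acc) []) ≠ [] then
        String.ofList ((PySem.List.sorted (PySem.Set.ofList s.toList) (fun c => c) false).foldl
          (fun (acc : List Char) c =>
            if PySem.List.pyGetD ((PySem.List.enumerate s.toList 0).filterMap (fun p => if p.2 = c then some p.1 else none)) (-1) 0
                - PySem.List.pyGetD ((PySem.List.enumerate s.toList 0).filterMap (fun p => if p.2 = c then some p.1 else none)) 0 0 + 1
                ≠ (((PySem.List.enumerate s.toList 0).filterMap (fun p => if p.2 = c then some p.1 else none)).length : Int) then
              acc ++ [c]
            else acc) [])
      else "N")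
  have hfold := foldA_eq s.toList PySem.Set.empty PySem.Set.empty none
  set cs := s.toList with hcs
  set Aset := ((cs.foldl stepA (PySem.Set.empty, none, PySem.Set.empty)).1) with hAset
  have hAeq : Aset = ((lead none cs).foldl step2 (PySem.Set.empty, PySem.Set.empty)).1 :=
    congrArg Prod.fst hfold
  have hApred : ∀ x, x ∈ Aset ↔ 2 ≤ (lead none cs).count x := by
    intro x
    rw [hAeq, mem_fold2]
    simp [PySem.Set.empty]
  have hAnodup : Aset.Nodup := by
    rw [hAeq]; exact nodup_fold2 _ _ _ List.nodup_nil
  -- B's loop is a filter of the sorted distinct characters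
  have hBpred : ∀ (c : Char),
      ((PySem.List.enumerate cs 0).filterMap (fun p => if p.2 = c then some p.1 else none)) = pA c 0 cs :=
    fun c => pA_eq_filterMap c cs 0
  set pred := fun c =>
    decide (PySem.List.pyGetD (pA c 0 cs) (-1) 0 - PySem.List.pyGetD (pA c 0 cs) 0 0 + 1
      ≠ ((pA c 0 cs).length : Int)) with hpreddef
  have hBfold : ((PySem.List.sorted (PySem.Set.ofList cs) (fun c => c) false).foldl
      (fun (acc : List Char) c =>
        if PySem.List.pyGetD ((PySem.List.enumerate cs 0).filterMap (fun p => if p.2 = c then some p.1 else none)) (-1) 0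
            - PySem.List.pyGetD ((PySem.List.enumerate cs 0).filterMap (fun p => if p.2 = c then some p.1 else none)) 0 0 + 1
            ≠ (((PySem.List.enumerate cs 0).filterMap (fun p => if p.2 = c then some p.1 else none)).length : Int) then
          acc ++ [c]
        else acc) [])
      = (PySem.List.sorted (PySem.Set.ofList cs) (fun c => c) false).filter pred := by
    have := PySem.List.foldl_append_if pred (fun c => c)
      (PySem.List.sorted (PySem.Set.ofList cs) (fun c => c) false) []
    simp only [List.map_id', List.nil_append] at this
    rw [← this]
    apply PySem.List.foldl_congr_mem
    intro acc c _
    simp only [hBpred c, hpreddef]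
    split <;> rename_i hsp
    · rw [if_pos]
      simpa using hsp
    · rw [if_neg]
      simpa using hsp
  set B := (PySem.List.sorted (PySem.Set.ofList cs) (fun c => c) false).filter pred with hB
  have hBpair : B.Pairwise (· < ·) :=
    List.Pairwise.filter _ (PySem.List.sorted_ofList_pairwise_lt cs)
  have hBnodup : B.Nodup := hBpair.nodup
  have hBmem : ∀ x, x ∈ B ↔ (x ∈ cs ∧ pred x = true) := by
    intro x
    rw [hB, List.mem_filter, PySem.List.mem_sorted, PySem.Set.mem_ofList]
  have hmem : ∀ x, x ∈ B ↔ x ∈ Aset := by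
    intro x
    rw [hBmem, hApred, core]
    simp [hpreddef]
  have hperm : B.Perm Aset := (List.perm_ext_iff_of_nodup hBnodup hAnodup).mpr hmem
  have hsorted : PySem.List.sorted Aset (fun c => c) false = B :=
    PySem.List.sorted_eq_of_perm_of_pairwise_lt Aset B (fun c => c) hperm hBpair
  rw [hBfold]
  by_cases hA0 : Aset = []
  · have hB0 : B = [] := by
      rw [hA0] at hperm
      exact hperm.eq_nil
    rw [if_neg (by simp [hA0]), if_neg (by simp [hB0])]
  · have hB0 : B ≠ [] := fun h => hA0 (by rw [h] at hperm; exact hperm.symm.eq_nil)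
    rw [if_pos (by simpa using hA0), if_pos (by simpa using hB0), hsorted]
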